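-- pv_equiv track=rewrite | github.com/shydl3/Red | shy/hashing/More hashing examples/2260. Minimum Consecutive Cards to Pick Up.py | minCardPickup
-- ===== SOURCE A (Python) =====
-- from collections import defaultdict
--
-- def minCardPickup(cards: list[int]) -> int:
--     dic = defaultdict(list)
--
--     for i in range(len(cards)):
--         dic[cards[i]].append(i)
--         ans = float('inf')
--
--         for key in dic:
--             arr = dic[key]
--
--             for i in range(len(arr) - 1):
--
--                 # dist between 2 duplicate elements
--                 ans = min(ans, arr[i + 1] - arr[i] + 1)
--
--     return ans if ans < float('inf') else -1
-- ===== SOURCE B (Python) =====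
-- def minCardPickup(cards):
--     last = {}
--     best = None
--     for i, v in enumerate(cards):
--         if v in last:
--             d = i - last[v] + 1
--             best = d if best is None or d < best else best
--         last[v] = i
--     return -1 if best is None else best
-- ===== Notes on version B (the rewrite author's own statement) =====
-- stated objective: faster
-- what changed: A rebuilds a value->index-list dict and rescans every consecutive pair of every list on each of the n iterations (O(n^2)); B is a single pass keeping only the last-seen index per value and a running minimum (O(n)).
import Mathlib
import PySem

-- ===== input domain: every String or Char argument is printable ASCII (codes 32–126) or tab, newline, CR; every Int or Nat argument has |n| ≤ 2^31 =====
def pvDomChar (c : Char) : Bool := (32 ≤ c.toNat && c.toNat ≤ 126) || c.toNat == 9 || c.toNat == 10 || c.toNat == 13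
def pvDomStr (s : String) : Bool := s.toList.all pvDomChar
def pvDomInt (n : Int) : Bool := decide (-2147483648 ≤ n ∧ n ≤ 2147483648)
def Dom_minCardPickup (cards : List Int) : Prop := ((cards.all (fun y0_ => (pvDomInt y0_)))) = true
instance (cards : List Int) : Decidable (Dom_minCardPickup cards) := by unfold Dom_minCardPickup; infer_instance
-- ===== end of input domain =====

-- B replaces A's per-element rebuild-and-rescan of a value->indices dict by one pass keeping
-- only the last-seen index per value and a running minimum. (Equivalence proved on nonempty lists;
-- on [] A raises UnboundLocalError while B returns -1; Pre_ excludes [].)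


-- ===== PORT A =====
-- min(ans, x) with ans possibly float('inf'): none models inf.
def pvMinOpt (o : Option Int) (x : Int) : Option Int :=
  match o with | none => some x | some a => some (min a x)

-- inner loop: for i in range(len(arr) - 1): ans = min(ans, arr[i+1] - arr[i] + 1)
def pvInner (ans : Option Int) (arr : List Int) : Option Int :=
  (PySem.List.pyRange 0 ((arr.length : Int) - 1) 1).foldl
    (fun a i => pvMinOpt a (PySem.List.pyGetD arr (i + 1) 0 - PySem.List.pyGetD arr i 0 + 1)) ans

-- the body of one outer iteration: ans = float('inf'); for key in dic: …
def pvScan (dic : PySem.Dict Int (List Int)) : Option Int :=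
  dic.keys.foldl (fun a k => pvInner a (dic.getD k [])) none

-- Faithful on nonempty cards; on [] Python never assigns ans (UnboundLocalError), excluded by Pre_.
def minCardPickup (cards : List Int) : Int :=
  match ((PySem.List.pyRange 0 (cards.length : Int) 1).foldl
    (fun (st : PySem.Dict Int (List Int) × Option Int) i =>
      let dic := st.1.modify (PySem.List.pyGetD cards i 0) [] (· ++ [i])
      (dic, pvScan dic))
    (PySem.Dict.empty, none)).2 with
  | some a => a
  | none => -1

-- ===== PORT B =====
def minCardPickup_alt (cards : List Int) : Int :=
  match ((PySem.List.enumerate cards).foldl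
    (fun (st : PySem.Dict Int Int × Option Int) p =>
      let best :=
        match st.1.get? p.2 with
        | none => st.2
        | some j =>
          let d := p.1 - j + 1
          match st.2 with
          | none => some d
          | some b => if d < b then some d else some b
      (st.1.insert p.2 p.1, best))
    (PySem.Dict.empty, none)).2 with
  | some b => b
  | none => -1

-- ===== PRECONDITION & SPEC =====
-- Pre_ excludes only the empty list, on which A raises UnboundLocalError (ans is never assigned).
def Pre_minCardPickup (cards : List Int) : Prop := cards ≠ []
instance (cards : List Int) : Decidable (Pre_minCardPickup cards) := by unfold Pre_minCardPickup; infer_instance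
def pvWitness_minCardPickup : List Int := [1, 2, 1]

def Spec_minCardPickup (cards : List Int) (out : Int) : Prop := out = minCardPickup_alt cards
instance (cards : List Int) (out : Int) : Decidable (Spec_minCardPickup cards out) := by unfold Spec_minCardPickup; infer_instance

-- ===== CLAIM (what is proved, stated in full; the proofs are below) =====
def Claim_equal_minCardPickup : Prop := ∀ (cards : List Int), Dom_minCardPickup cards → Pre_minCardPickup cards → Spec_minCardPickup cards (minCardPickup cards)

-- ===== LEMMAS AND PROOFS =====
theorem pvMinOpt_swap (a : Option Int) (x y : Int) :
    pvMinOpt (pvMinOpt a x) y = pvMinOpt (pvMinOpt a y) x := by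
  cases a <;> simp [pvMinOpt, min_assoc, min_comm x y]

theorem foldMin_swap (f : Int → Int) (l : List Int) (a : Option Int) (x : Int) :
    l.foldl (fun a i => pvMinOpt a (f i)) (pvMinOpt a x)
      = pvMinOpt (l.foldl (fun a i => pvMinOpt a (f i)) a) x := by
  induction l generalizing a with
  | nil => rfl
  | cons h t ih => simp only [List.foldl_cons, pvMinOpt_swap a x (f h), ih]

theorem pvInner_minOpt (arr : List Int) (a : Option Int) (x : Int) :
    pvInner (pvMinOpt a x) arr = pvMinOpt (pvInner a arr) x := by
  unfold pvInner
  exact foldMin_swap _ _ a x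

theorem pvInner_nil (a : Option Int) : pvInner a [] = a := by rfl

theorem pvInner_single (a : Option Int) (i : Int) : pvInner a [i] = a := by rfl

theorem keysFold_minOpt (ks : List Int) (g : Int → List Int) (a : Option Int) (x : Int) :
    ks.foldl (fun a k => pvInner a (g k)) (pvMinOpt a x)
      = pvMinOpt (ks.foldl (fun a k => pvInner a (g k)) a) x := by
  induction ks generalizing a with
  | nil => rfl
  | cons h t ih => simp only [List.foldl_cons, pvInner_minOpt (g h) a x, ih]

theorem pvGetD_append_lt (arr : List Int) (x : Int) (k : Nat) (hk : k < arr.length) :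
    PySem.List.pyGetD (arr ++ [x]) (k : Int) 0 = PySem.List.pyGetD arr (k : Int) 0 := by
  simp [PySem.List.pyGetD_natCast, List.getElem?_append_left hk]

theorem pvInner_append (arr : List Int) (j i : Int) (a : Option Int)
    (h : arr.getLast? = some j) :
    pvInner a (arr ++ [i]) = pvMinOpt (pvInner a arr) (i - j + 1) := by
  have hne : arr ≠ [] := by intro e; rw [e] at h; simp at h
  have hlen : 1 ≤ arr.length := List.length_pos_of_ne_nil hne
  unfold pvInner
  have hlen' : ((arr ++ [i]).length : Int) - 1 = ((arr.length : Int) - 1) + 1 := by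
    simp
  rw [hlen', PySem.List.pyRange_one_succ_right (by omega : (0:Int) ≤ (arr.length : Int) - 1)]
  rw [List.foldl_append]
  have hcongr : (PySem.List.pyRange 0 ((arr.length : Int) - 1) 1).foldl
      (fun a m => pvMinOpt a (PySem.List.pyGetD (arr ++ [i]) (m + 1) 0 - PySem.List.pyGetD (arr ++ [i]) m 0 + 1)) a
      = (PySem.List.pyRange 0 ((arr.length : Int) - 1) 1).foldl
      (fun a m => pvMinOpt a (PySem.List.pyGetD arr (m + 1) 0 - PySem.List.pyGetD arr m 0 + 1)) a := by
    apply PySem.List.foldl_congr_mem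
    intro acc m hm
    have hb := (PySem.List.mem_pyRange_one.mp hm)
    obtain ⟨k, rfl⟩ : ∃ k : Nat, m = (k : Int) := ⟨m.toNat, by omega⟩
    have hk1 : k < arr.length := by omega
    have hk1' : k + 1 < arr.length := by omega
    have g1 := pvGetD_append_lt arr i k hk1
    have g2 := pvGetD_append_lt arr i (k + 1) hk1'
    rw [Nat.cast_add, Nat.cast_one] at g2
    rw [g1, g2]
  rw [hcongr]
  simp only [List.foldl_cons, List.foldl_nil]
  congr 1
  have hj : arr[arr.length - 1]? = some j := by
    rw [List.getLast?_eq_getElem?] at h; exact h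
  have e1 : ((arr.length : Int) - 1) + 1 = ((arr.length : Nat) : Int) := by ring
  have e2 : ((arr.length : Int) - 1) = ((arr.length - 1 : Nat) : Int) := by omega
  rw [e1, e2]
  have g3 : PySem.List.pyGetD (arr ++ [i]) ((arr.length : Nat) : Int) 0 = i := by
    simp [PySem.List.pyGetD_natCast]
  have g4 : PySem.List.pyGetD (arr ++ [i]) ((arr.length - 1 : Nat) : Int) 0 = j := by
    have hlt : (arr.length - 1) < arr.length := by omega
    have h1 : (arr ++ [i])[(arr.length - 1 : Nat)]? = some j := by
      rw [List.getElem?_append_left hlt]; exact hj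
    have hlt2 : arr.length - 1 < (arr ++ [i]).length := by simp
    simp at h1
    simp [PySem.List.pyGetD_natCast, h1]
  rw [g3, g4]

theorem pvScan_modify (d : PySem.Dict Int (List Int)) (v i : Int)
    (hnd : d.keys.Nodup) :
    pvScan (d.modify v [] (· ++ [i]))
      = match (d.getD v []).getLast? with
        | none => pvScan d
        | some j => pvMinOpt (pvScan d) (i - j + 1) := by
  by_cases hc : d.contains v = true
  · -- v already a key: key list unchanged, v's list extended
    have hkeys : (d.modify v [] (· ++ [i])).keys = d.keys := by
      simp [PySem.Dict.keys_modify, PySem.Dict.keys_insert_of_contains d _ hc]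
    have hv : v ∈ d.keys := (PySem.Dict.contains_iff_mem_keys d v).mp hc
    obtain ⟨ks1, ks2, hsplit⟩ := List.append_of_mem hv
    have hnd' := hnd
    rw [hsplit] at hnd'
    have hv1 : v ∉ ks1 := by
      intro hmem
      exact (List.disjoint_of_nodup_append hnd') hmem List.mem_cons_self
    have hv2 : v ∉ ks2 := by
      have h2 := hnd'.of_append_right
      rw [List.nodup_cons] at h2
      exact h2.1
    have hgetD : ∀ k : Int, k ≠ v →
        (d.modify v [] (· ++ [i])).getD k [] = d.getD k [] := by
      intro k hk
      rw [PySem.Dict.getD_modify]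
      simp [hk]
    have hgetv : (d.modify v [] (· ++ [i])).getD v [] = d.getD v [] ++ [i] := by
      rw [PySem.Dict.getD_modify]; simp
    unfold pvScan
    rw [hkeys, hsplit, List.foldl_append, List.foldl_append, List.foldl_cons, List.foldl_cons]
    have c1 : ∀ (a : Option Int),
        ks1.foldl (fun a k => pvInner a ((d.modify v [] (· ++ [i])).getD k [])) a
          = ks1.foldl (fun a k => pvInner a (d.getD k [])) a := by
      intro a
      apply PySem.List.foldl_congr_mem
      intro acc k hk
      rw [hgetD k (fun e => hv1 (e ▸ hk))]
    have c2 : ∀ (a : Option Int),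
        ks2.foldl (fun a k => pvInner a ((d.modify v [] (· ++ [i])).getD k [])) a
          = ks2.foldl (fun a k => pvInner a (d.getD k [])) a := by
      intro a
      apply PySem.List.foldl_congr_mem
      intro acc k hk
      rw [hgetD k (fun e => hv2 (e ▸ hk))]
    rw [c1, c2, hgetv]
    cases hL : (d.getD v []).getLast? with
    | none =>
      have hnil : d.getD v [] = [] := List.getLast?_eq_none_iff.mp hL
      rw [hnil]
      simp [pvInner_single, pvInner_nil]
    | some j =>
      rw [pvInner_append _ j i _ hL]
      exact keysFold_minOpt ks2 (fun k => d.getD k []) _ _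
  · -- v a fresh key: appended with the one-element list [i], contributing nothing
    have hc' : d.contains v = false := by simpa using hc
    have hnil : d.getD v [] = [] := PySem.Dict.getD_of_not_contains d _ hc'
    have hkeys : (d.modify v [] (· ++ [i])).keys = d.keys ++ [v] := by
      simp [PySem.Dict.keys_modify, PySem.Dict.keys_insert_of_not_contains d _ hc']
    have hvmem : v ∉ d.keys := by
      simp [← PySem.Dict.contains_iff_mem_keys, hc']
    unfold pvScan
    rw [hkeys, List.foldl_append, List.foldl_cons, List.foldl_nil]
    have c1 : ∀ (a : Option Int),
        (d.keys).foldl (fun a k => pvInner a ((d.modify v [] (· ++ [i])).getD k [])) a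
          = (d.keys).foldl (fun a k => pvInner a (d.getD k [])) a := by
      intro a
      apply PySem.List.foldl_congr_mem
      intro acc k hk
      rw [PySem.Dict.getD_modify]
      have hkv : k ≠ v := fun e => hvmem (e ▸ hk)
      simp [hkv]
    rw [c1]
    have hgetv : (d.modify v [] (· ++ [i])).getD v [] = [i] := by
      rw [PySem.Dict.getD_modify]; simp [hnil]
    rw [hgetv, pvInner_single, hnil]
    rfl

-- A's dict after processing the enumerated pairs of a prefix
def pvAdic (l : List (Int × Int)) : PySem.Dict Int (List Int) :=
  l.foldl (fun d p => d.modify p.2 [] (· ++ [p.1])) PySem.Dict.empty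

-- one step of B's pass
def pvBstep (st : PySem.Dict Int Int × Option Int) (p : Int × Int) :
    PySem.Dict Int Int × Option Int :=
  let best :=
    match st.1.get? p.2 with
    | none => st.2
    | some j =>
      let d := p.1 - j + 1
      match st.2 with
      | none => some d
      | some b => if d < b then some d else some b
  (st.1.insert p.2 p.1, best)

theorem pvAdic_nodup (l : List (Int × Int)) : (pvAdic l).keys.Nodup := by
  unfold pvAdic
  exact PySem.Dict.nodup_keys_foldl_modify_key l (fun p => p.2) []
    (fun _ p => (· ++ [p.1])) PySem.Dict.empty (by rw [PySem.Dict.keys_empty]; exact List.nodup_nil)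

theorem pvAdic_append (l : List (Int × Int)) (p : Int × Int) :
    pvAdic (l ++ [p]) = (pvAdic l).modify p.2 [] (· ++ [p.1]) := by
  unfold pvAdic
  rw [List.foldl_append, List.foldl_cons, List.foldl_nil]

theorem pv_invariant (l : List (Int × Int)) :
    (∀ v, (l.foldl pvBstep (PySem.Dict.empty, none)).1.get? v
            = ((pvAdic l).getD v []).getLast?)
    ∧ (l.foldl pvBstep (PySem.Dict.empty, none)).2 = pvScan (pvAdic l) := by
  induction l using List.reverseRecOn with
  | nil =>
    constructor
    · intro v
      simp [pvAdic, PySem.Dict.get?_empty, PySem.Dict.getD_empty]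
    · simp [pvAdic, pvScan, PySem.Dict.keys_empty]
  | append_singleton l p ih =>
    rw [List.foldl_append, List.foldl_cons, List.foldl_nil, pvAdic_append]
    constructor
    · intro v
      show ((l.foldl pvBstep (PySem.Dict.empty, none)).1.insert p.2 p.1).get? v = _
      rw [PySem.Dict.get?_insert, PySem.Dict.getD_modify]
      by_cases hv : v = p.2
      · simp [hv]
      · simp [hv, ih.1 v]
    · show (match (l.foldl pvBstep (PySem.Dict.empty, none)).1.get? p.2 with
        | none => (l.foldl pvBstep (PySem.Dict.empty, none)).2
        | some j =>
          match (l.foldl pvBstep (PySem.Dict.empty, none)).2 with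
          | none => some (p.1 - j + 1)
          | some b => if p.1 - j + 1 < b then some (p.1 - j + 1) else some b) = _
      rw [ih.1 p.2, ih.2, pvScan_modify _ _ _ (pvAdic_nodup l)]
      cases hL : ((pvAdic l).getD p.2 []).getLast? with
      | none => rfl
      | some j =>
        cases hS : pvScan (pvAdic l) with
        | none => rfl
        | some b =>
          show (if p.1 - j + 1 < b then some (p.1 - j + 1) else some b) = some (min b (p.1 - j + 1))
          split_ifs with h <;> simp [min_def] <;> omega

theorem pvAfold (l : List (Int × Int)) (d : PySem.Dict Int (List Int)) (a : Option Int)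
    (h : l ≠ []) :
    l.foldl (fun (st : PySem.Dict Int (List Int) × Option Int) p =>
        let dic := st.1.modify p.2 [] (· ++ [p.1]); (dic, pvScan dic)) (d, a)
      = (l.foldl (fun d p => d.modify p.2 [] (· ++ [p.1])) d,
         pvScan (l.foldl (fun d p => d.modify p.2 [] (· ++ [p.1])) d)) := by
  induction l generalizing d a with
  | nil => exact absurd rfl h
  | cons p t ih =>
    cases t with
    | nil => rfl
    | cons q r =>
      simp only [List.foldl_cons]
      exact ih (d.modify p.2 [] (· ++ [p.1])) (pvScan (d.modify p.2 [] (· ++ [p.1]))) (by simp)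

theorem minCardPickup_eq (cards : List Int) (h : cards ≠ []) :
    minCardPickup cards = minCardPickup_alt cards := by
  unfold minCardPickup minCardPickup_alt
  have hb : (PySem.List.enumerate cards).foldl (fun (st : PySem.Dict Int Int × Option Int) p =>
      let best :=
        match st.1.get? p.2 with
        | none => st.2
        | some j =>
          let d := p.1 - j + 1
          match st.2 with
          | none => some d
          | some b => if d < b then some d else some b
      (st.1.insert p.2 p.1, best)) (PySem.Dict.empty, none)
      = (PySem.List.enumerate cards).foldl pvBstep (PySem.Dict.empty, none) := rfl
  have ha : (PySem.List.pyRange 0 (cards.length : Int) 1).foldl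
      (fun (st : PySem.Dict Int (List Int) × Option Int) i =>
        let dic := st.1.modify (PySem.List.pyGetD cards i 0) [] (· ++ [i])
        (dic, pvScan dic)) (PySem.Dict.empty, none)
      = (PySem.List.enumerate cards).foldl
        (fun (st : PySem.Dict Int (List Int) × Option Int) p =>
          let dic := st.1.modify p.2 [] (· ++ [p.1])
          (dic, pvScan dic)) (PySem.Dict.empty, none) := by
    rw [PySem.List.enumerate_eq_map_pyRange cards 0, List.foldl_map]
    rfl
  rw [hb, ha]
  have hne : PySem.List.enumerate cards ≠ [] := by
    cases cards with
    | nil => exact absurd rfl h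
    | cons x t => simp [PySem.List.enumerate_cons]
  rw [pvAfold _ _ _ hne]
  rw [(pv_invariant (PySem.List.enumerate cards)).2]
  rfl

-- ===== VERDICT (by name: the statement is the Claim_ definition above) =====
theorem minCardPickup_spec : Claim_equal_minCardPickup := by
  intro cards _ hpre
  unfold Spec_minCardPickup
  exact minCardPickup_eq cards hpre
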